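-- pv_equiv track=rewrite | github.com/Levan-Demetrashvili/jack-compiler | utilis.py | remove_outer_brackets
-- ===== SOURCE A (Python) =====
-- def remove_outer_brackets(s):
--   depth = 0
--   result = ""
--   for char in s:
--     if depth:
--       result += char
--     if char == '[':
--       depth += 1
--     elif char == ']':
--       depth -= 1
--     if depth == 0 and result:
--       return result[:-1]
--   return s
-- ===== SOURCE B (Python) =====
-- def remove_outer_brackets(s):
--     i = None
--     for k, c in enumerate(s):
--         if c == '[' or c == ']':
--             i = k
--             break
--     if i is None:
--         return s
--     depth = 1 if s[i] == '[' else -1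
--     for j in range(i + 1, len(s)):
--         c = s[j]
--         if c == '[':
--             depth += 1
--         elif c == ']':
--             depth -= 1
--         if depth == 0:
--             return s[i + 1:j]
--     return s
-- ===== Notes on version B (the rewrite author's own statement) =====
-- stated objective: alternative
-- what changed: A accumulates characters into a growing result string inside one loop and returns result[:-1]; B instead first locates the first bracket character, then runs a pure depth-counting scan to find the closing index and returns a slice s[i+1:j], accumulating nothing.
import Mathlib
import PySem

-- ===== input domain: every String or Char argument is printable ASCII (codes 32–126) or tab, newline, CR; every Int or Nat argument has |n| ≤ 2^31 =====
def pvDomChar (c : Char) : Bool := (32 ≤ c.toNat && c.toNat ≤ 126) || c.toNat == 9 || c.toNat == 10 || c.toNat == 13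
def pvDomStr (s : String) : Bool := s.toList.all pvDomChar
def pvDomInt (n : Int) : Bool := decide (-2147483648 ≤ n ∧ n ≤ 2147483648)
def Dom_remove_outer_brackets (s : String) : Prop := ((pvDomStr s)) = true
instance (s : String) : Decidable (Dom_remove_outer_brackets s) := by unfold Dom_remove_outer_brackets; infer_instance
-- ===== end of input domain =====

-- B replaces A's accumulate-then-dropLast single loop by find-first-bracket + depth scan + slice (different decomposition, same cost).


-- ===== PORT A =====
-- A's for-loop with early return, ported as structural recursion over the char list;
-- state = (depth, result); exact on all inputs.
def goA (orig : List Char) : List Char → Int → List Char → List Char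
  | [], _, _ => orig
  | c :: rest, depth, result =>
    let result' := if depth ≠ 0 then result ++ [c] else result
    let depth' := if c = '[' then depth + 1 else if c = ']' then depth - 1 else depth
    if depth' = 0 ∧ result' ≠ [] then result'.dropLast else goA orig rest depth' result'

def remove_outer_brackets (s : String) : String :=
  String.ofList (goA s.toList s.toList 0 [])

-- ===== PORT B =====
-- B-side helper: scan for the first '[' or ']' (the enumerate/break loop), returning its index.
def altFind : List Char → Nat → Option Nat
  | [], _ => none
  | c :: rest, k => if c = '[' ∨ c = ']' then some k else altFind rest (k + 1)

-- B-side helper: the j-loop over s[i+1:], tracking depth, returning the index j where depth hits 0.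
def altLoop : List Char → Nat → Int → Option Nat
  | [], _, _ => none
  | c :: rest, j, depth =>
    let depth' := if c = '[' then depth + 1 else if c = ']' then depth - 1 else depth
    if depth' = 0 then some j else altLoop rest (j + 1) depth'

def remove_outer_brackets_alt (s : String) : String :=
  match altFind s.toList 0 with
  | none => s
  | some i =>
    match altLoop (s.toList.drop (i + 1)) (i + 1)
        (if s.toList.getD i ' ' = '[' then 1 else -1) with
    | none => s
    | some j => String.ofList ((s.toList.take j).drop (i + 1))   -- s[i+1:j], 0 ≤ i+1 ≤ j ≤ len: exact

-- ===== PRECONDITION & SPEC =====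
def Spec_remove_outer_brackets (s : String) (out : String) : Prop := out = remove_outer_brackets_alt s
instance (s : String) (out : String) : Decidable (Spec_remove_outer_brackets s out) := by unfold Spec_remove_outer_brackets; infer_instance

-- ===== CLAIM (what is proved, stated in full; the proofs are below) =====
def Claim_equal_remove_outer_brackets : Prop := ∀ (s : String), Dom_remove_outer_brackets s → Spec_remove_outer_brackets s (remove_outer_brackets s)

-- ===== LEMMAS AND PROOFS =====

def isBr (c : Char) : Bool := c = '[' ∨ c = ']'

-- proof-side: the list of chars consumed strictly before depth returns to 0
def phase2 : List Char → Int → Option (List Char)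
  | [], _ => none
  | c :: rest, depth =>
    let depth' := if c = '[' then depth + 1 else if c = ']' then depth - 1 else depth
    if depth' = 0 then some [] else (phase2 rest depth').map (c :: ·)

theorem goA_phase2 (orig : List Char) (t : List Char) :
    ∀ d acc, d ≠ 0 →
      goA orig t d acc = (match phase2 t d with | none => orig | some u => acc ++ u) := by
  induction t with
  | nil => intro d acc hd; simp [goA, phase2]
  | cons c rest ih =>
    intro d acc hd
    simp only [goA, phase2, if_pos hd]
    set d' := if c = '[' then d + 1 else if c = ']' then d - 1 else d with hd'
    by_cases h0 : d' = 0
    · simp [h0]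
    · rw [if_neg (by simp [h0]), if_neg h0, ih d' (acc ++ [c]) h0]
      cases phase2 rest d' <;> simp

theorem altLoop_phase2 (t : List Char) :
    ∀ p d, altLoop t p d = (phase2 t d).map (fun u => p + u.length) := by
  induction t with
  | nil => intro p d; simp [altLoop, phase2]
  | cons c rest ih =>
    intro p d
    simp only [altLoop, phase2]
    set d' := if c = '[' then d + 1 else if c = ']' then d - 1 else d
    by_cases h0 : d' = 0
    · simp [h0]
    · rw [if_neg h0, if_neg h0, ih]
      cases phase2 rest d' with
      | none => simp
      | some u => simp; omega

theorem phase2_prefix (t : List Char) :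
    ∀ d u, phase2 t d = some u → u <+: t := by
  induction t with
  | nil => intro d u h; simp [phase2] at h
  | cons c rest ih =>
    intro d u h
    simp only [phase2] at h
    set d' := if c = '[' then d + 1 else if c = ']' then d - 1 else d
    by_cases h0 : d' = 0
    · rw [if_pos h0] at h; cases h; simp
    · rw [if_neg h0] at h
      cases hp : phase2 rest d' with
      | none => simp [hp] at h
      | some u' =>
        simp [hp] at h
        subst h
        exact List.cons_prefix_cons.mpr ⟨rfl, ih d' u' hp⟩

theorem goA_skip (orig : List Char) (pre : List Char) (t : List Char)
    (h : ∀ c ∈ pre, isBr c = false) :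
    goA orig (pre ++ t) 0 [] = goA orig t 0 [] := by
  induction pre with
  | nil => simp
  | cons c cs ih =>
    have hc : isBr c = false := h c (List.mem_cons_self ..)
    have hl : c ≠ '[' := by intro hh; simp [isBr, hh] at hc
    have hr : c ≠ ']' := by intro hh; simp [isBr, hh] at hc
    simp only [List.cons_append, goA, if_neg hl, if_neg hr]
    simpa using ih (fun x hx => h x (List.mem_cons_of_mem _ hx))

theorem altFind_skip (pre : List Char) (t : List Char)
    (h : ∀ c ∈ pre, isBr c = false) :
    ∀ k, altFind (pre ++ t) k = altFind t (k + pre.length) := by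
  induction pre with
  | nil => intro k; simp
  | cons c cs ih =>
    intro k
    have hc : isBr c = false := h c (List.mem_cons_self ..)
    have : ¬ (c = '[' ∨ c = ']') := by
      intro hh; rcases hh with hh | hh <;> simp [isBr, hh] at hc
    simp only [List.cons_append, altFind, if_neg this]
    rw [ih (fun x hx => h x (List.mem_cons_of_mem _ hx))]
    congr 1
    simp; omega

theorem altFind_nobr (t : List Char) (h : ∀ c ∈ t, isBr c = false) :
    ∀ k, altFind t k = none := by
  induction t with
  | nil => intro k; rfl
  | cons c cs ih =>
    intro k
    have hc : isBr c = false := h c (List.mem_cons_self ..)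
    have : ¬ (c = '[' ∨ c = ']') := by
      intro hh; rcases hh with hh | hh <;> simp [isBr, hh] at hc
    simp only [altFind, if_neg this]
    exact ih (fun x hx => h x (List.mem_cons_of_mem _ hx)) _

theorem goA_nobr (orig : List Char) (t : List Char) (h : ∀ c ∈ t, isBr c = false) :
    goA orig t 0 [] = orig := by
  have := goA_skip orig t [] h
  simpa [goA] using this

theorem remove_outer_brackets_spec_aux (s : String) :
    remove_outer_brackets s = remove_outer_brackets_alt s := by
  unfold remove_outer_brackets remove_outer_brackets_alt
  set cs := s.toList with hcs
  by_cases hbr : ∀ c ∈ cs, isBr c = false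
  · rw [altFind_nobr cs hbr 0, goA_nobr cs cs hbr, hcs, String.ofList_toList]
  · -- split cs at the first bracket
    set pre := cs.takeWhile (fun c => !isBr c) with hpre
    set rest := cs.dropWhile (fun c => !isBr c) with hrest
    have hsplit : cs = pre ++ rest := (List.takeWhile_append_dropWhile).symm
    have hprenb : ∀ c ∈ pre, isBr c = false := by
      intro c hc
      have := List.mem_takeWhile_imp (hpre ▸ hc)
      simpa using this
    cases hre : rest with
    | nil =>
      exact absurd (fun c hc => hprenb c (by rw [hsplit, hre, List.append_nil] at hc; exact hc)) hbr
    | cons b t =>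
      have hb : isBr b = true := by
        have := List.head?_dropWhile_not (p := fun c => !isBr c) cs
        rw [← hrest, hre] at this
        simpa using this
      have hbor : b = '[' ∨ b = ']' := by
        by_cases h1 : b = '['
        · exact Or.inl h1
        · right; by_contra h2; simp [isBr, h1, h2] at hb
      rw [hsplit, hre, altFind_skip pre _ hprenb 0]
      simp only [altFind, if_pos hbor, Nat.zero_add]
      -- A side: skip pre, then the bracket step
      rw [goA_skip (pre ++ b :: t) pre _ hprenb]
      have hd0 : (if b = '[' then (0:Int) + 1 else if b = ']' then 0 - 1 else 0) =
          (if b = '[' then 1 else -1) := by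
        rcases hbor with h1 | h1 <;> subst h1 <;> simp
      set d : Int := if b = '[' then 1 else -1 with hdd
      have hdne : d ≠ 0 := by
        rcases hbor with h1 | h1 <;> subst h1 <;> simp [hdd]
      have hA : goA (pre ++ b :: t) (b :: t) 0 [] = goA (pre ++ b :: t) t d [] := by
        simp only [goA, hd0]
        rw [if_neg (by simp [hdne]), if_neg (by simp)]
      rw [hA, goA_phase2 (pre ++ b :: t) t d [] hdne]
      -- B side: getD at pre.length is b; drop (pre.length+1) is t
      have hget : (pre ++ b :: t).getD pre.length ' ' = b := by
        simp [List.getD_eq_getElem?_getD]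
      have hdrop : (pre ++ b :: t).drop (pre.length + 1) = t := by
        rw [← List.drop_drop, List.drop_left]
        rfl
      rw [hget, hdrop, ← hdd, altLoop_phase2 t (pre.length + 1) d]
      cases hp : phase2 t d with
      | none =>
        simp only [Option.map_none]
        rw [← hre, ← hsplit, hcs, String.ofList_toList]
      | some u =>
        have hu : u <+: t := phase2_prefix t d u hp
        have htake : ((pre ++ b :: t).take (pre.length + 1 + u.length)).drop (pre.length + 1)
            = u := by
          rw [List.drop_take, hdrop]
          have hl : pre.length + 1 + u.length - (pre.length + 1) = u.length := by omega
          rw [hl]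
          exact (List.prefix_iff_eq_take.mp hu).symm
        simp only [Option.map_some]
        rw [htake]
        simp

-- ===== VERDICT (by name: the statement is the Claim_ definition above) =====
theorem remove_outer_brackets_spec : Claim_equal_remove_outer_brackets := by
  intro s _
  exact (remove_outer_brackets_spec_aux s).symm ▸ rfl
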